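-- pv_equiv track=rewrite | github.com/Altinn/dialogporten-utils | dialogsearch-benchmark/condense_explains.py | build_index_dict
-- ===== SOURCE A (Python) =====
-- from typing import Dict, List, Tuple
--
-- def build_index_dict(names: List[str]) -> Dict[str, str]:
--     codes = []
--     for first in range(ord("A"), ord("Z") + 1):
--         for second in range(ord("A"), ord("Z") + 1):
--             codes.append(chr(first) + chr(second))
--     if len(names) > len(codes):
--         raise SystemExit("Too many index names for two-letter codes")
--     return {name: codes[idx] for idx, name in enumerate(names)}
-- ===== SOURCE B (Python) =====
-- from typing import Dict, List
--
-- def build_index_dict(names: List[str]) -> Dict[str, str]: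
--     if len(names) > 676:
--         raise SystemExit("Too many index names for two-letter codes")
--     result = {}
--     a, b = "A", "A"
--     for name in names:
--         result[name] = a + b
--         if b == "Z":
--             a = chr(ord(a) + 1)
--             b = "A"
--         else:
--             b = chr(ord(b) + 1)
--     return result
-- ===== Notes on version B (the rewrite author's own statement) =====
-- stated objective: alternative
-- what changed: B replaces the precomputed 676-entry code table and indexed lookup with a single pass that carries the current two-letter code as mutable state and increments it like an odometer (bump second letter, carry into the first at 'Z'), so no table and no index arithmetic exist.
import Mathlib
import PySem

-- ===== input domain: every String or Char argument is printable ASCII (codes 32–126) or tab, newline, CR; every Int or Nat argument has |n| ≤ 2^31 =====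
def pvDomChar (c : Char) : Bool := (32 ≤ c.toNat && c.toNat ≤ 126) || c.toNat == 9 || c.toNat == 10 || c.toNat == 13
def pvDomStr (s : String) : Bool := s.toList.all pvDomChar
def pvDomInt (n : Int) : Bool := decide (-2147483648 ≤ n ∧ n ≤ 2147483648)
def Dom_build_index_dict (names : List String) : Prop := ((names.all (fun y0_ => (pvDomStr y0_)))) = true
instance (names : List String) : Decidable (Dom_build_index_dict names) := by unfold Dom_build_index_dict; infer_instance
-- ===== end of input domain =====

-- B replaces A's precomputed 676-entry code table with a single pass carrying the current
-- two-letter code as state and incrementing it like an odometer (objective: alternative).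

-- ===== PORT A =====
-- the 676-entry code table A builds with its nested loops
def pvCodesA : List String :=
  (PySem.List.pyRange 65 91 1).foldl (fun acc first =>
    (PySem.List.pyRange 65 91 1).foldl (fun acc2 second =>
      acc2 ++ [String.ofList [Char.ofNat first.toNat] ++ String.ofList [Char.ofNat second.toNat]]) acc) []

def build_index_dict (names : List String) : List (String × String) :=
  -- Pre_ guarantees every index is in range, so the .getD "" default is never used
  ((PySem.List.enumerate names 0).foldl
    (fun (d : PySem.Dict String String) p =>
      d.insert p.2 ((PySem.List.pyGet? pvCodesA p.1).getD ""))
    PySem.Dict.empty).items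

-- ===== PORT B =====
-- chr(ord(s) + 1) for the single-letter state strings of Source B (exact there)
def pvNext (s : String) : String := String.ofList [Char.ofNat ((s.toList.headD 'A').toNat + 1)]

-- the body of Source B's for-loop: insert the current code, then bump the odometer (b, carry into a)
def pvBStep (st : PySem.Dict String String × String × String) (name : String) :
    PySem.Dict String String × String × String :=
  if st.2.2 == "Z" then ((st.1).insert name (st.2.1 ++ st.2.2), pvNext st.2.1, "A")
  else ((st.1).insert name (st.2.1 ++ st.2.2), st.2.1, pvNext st.2.2)

def build_index_dict_alt (names : List String) : List (String × String) :=
  (names.foldl pvBStep (PySem.Dict.empty, "A", "A")).1.items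

-- ===== PRECONDITION & SPEC =====
-- A raises SystemExit when more than 676 names are given (B does too); those inputs are excluded.
def Pre_build_index_dict (names : List String) : Prop := names.length ≤ 676
instance (names : List String) : Decidable (Pre_build_index_dict names) := by
  unfold Pre_build_index_dict; infer_instance
def pvWitness_build_index_dict : List String := ["alpha", "beta", "gamma"]

def Spec_build_index_dict (names : List String) (out : List (String × String)) : Prop :=
  out = build_index_dict_alt names
instance (names : List String) (out : List (String × String)) :
    Decidable (Spec_build_index_dict names out) := by unfold Spec_build_index_dict; infer_instance

-- ===== CLAIM (what is proved, stated in full; the proofs are below) =====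
def Claim_equal_build_index_dict : Prop :=
  ∀ (names : List String), Dom_build_index_dict names → Pre_build_index_dict names →
    Spec_build_index_dict names (build_index_dict names)

-- ===== LEMMAS AND PROOFS =====

-- one-letter string and the code for index k
def pvChS (n : Nat) : String := String.ofList [Char.ofNat n]
def pvCodeOf (k : Nat) : String := pvChS (65 + k / 26) ++ pvChS (65 + k % 26)

-- common reference loop both ports are reduced to
def pvSpecLoop : List String → Nat → PySem.Dict String String → PySem.Dict String String
  | [], _, d => d
  | n :: ns, k, d => pvSpecLoop ns (k + 1) (d.insert n (pvCodeOf k))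

set_option maxRecDepth 100000 in
theorem pvCodesA_eq : pvCodesA = (List.range 676).map pvCodeOf := by decide

theorem pvCodesA_get (k : Nat) (hk : k < 676) :
    (PySem.List.pyGet? pvCodesA (k : Int)).getD "" = pvCodeOf k := by
  rw [PySem.List.pyGet?_natCast, pvCodesA_eq, List.getElem?_map,
    List.getElem?_range hk, Option.map_some, Option.getD_some]

theorem pvA_loop (names : List String) (k : Nat) (hk : k + names.length ≤ 676)
    (d : PySem.Dict String String) :
    (PySem.List.enumerate names (k : Int)).foldl
      (fun d p => d.insert p.2 ((PySem.List.pyGet? pvCodesA p.1).getD "")) d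
      = pvSpecLoop names k d := by
  induction names generalizing k d with
  | nil => simp [PySem.List.enumerate_nil, pvSpecLoop]
  | cons n ns ih =>
    rw [PySem.List.enumerate_cons, List.foldl_cons]
    have hcast : (k : Int) + 1 = ((k + 1 : Nat) : Int) := by push_cast; ring
    rw [hcast, ih (k + 1) (by simp only [List.length_cons] at hk; omega)]
    simp only [pvSpecLoop,
      pvCodesA_get k (by simp only [List.length_cons] at hk; omega)]

theorem pv_isZ (r : Nat) (hr : r < 26) : (pvChS (65 + r) == "Z") = decide (r = 25) := by
  interval_cases r <;> decide

theorem pv_head (n : Nat) (hn : n ≤ 91) :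
    ((pvChS n).toList.headD 'A').toNat = n := by
  have hv : n.isValidChar := Or.inl (by omega)
  simp [pvChS, String.toList_ofList, List.headD, Char.toNat_ofNat, hv]

theorem pvNext_chS (n : Nat) (hn : n ≤ 91) : pvNext (pvChS n) = pvChS (n + 1) := by
  rw [pvNext, pv_head n hn]; rfl

theorem pvBStep_eq (k : Nat) (hk : k < 676) (d : PySem.Dict String String) (n : String) :
    pvBStep (d, pvChS (65 + k / 26), pvChS (65 + k % 26)) n
      = (d.insert n (pvCodeOf k), pvChS (65 + (k + 1) / 26), pvChS (65 + (k + 1) % 26)) := by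
  unfold pvBStep
  simp only [pv_isZ (k % 26) (Nat.mod_lt _ (by omega))]
  by_cases h25 : k % 26 = 25
  · rw [if_pos (by simp [h25])]
    rw [pvNext_chS (65 + k / 26) (by omega),
      show (65 + k / 26) + 1 = 65 + (k + 1) / 26 from by omega]
    have hA : pvChS (65 + (k + 1) % 26) = "A" := by
      rw [show 65 + (k + 1) % 26 = 65 from by omega]; decide
    rw [hA]; rfl
  · rw [if_neg (by simp [h25])]
    rw [pvNext_chS (65 + k % 26) (by omega),
      show (65 + k % 26) + 1 = 65 + (k + 1) % 26 from by omega]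
    have hq : pvChS (65 + (k + 1) / 26) = pvChS (65 + k / 26) := by
      rw [show k / 26 = (k + 1) / 26 from by omega]
    rw [hq]; rfl

theorem pvB_loop (names : List String) (k : Nat) (hk : k + names.length ≤ 676)
    (d : PySem.Dict String String) :
    (names.foldl pvBStep (d, pvChS (65 + k / 26), pvChS (65 + k % 26))).1
      = pvSpecLoop names k d := by
  induction names generalizing k d with
  | nil => simp [pvSpecLoop]
  | cons n ns ih =>
    rw [List.foldl_cons, pvBStep_eq k (by simp only [List.length_cons] at hk; omega),
      ih (k + 1) (by simp only [List.length_cons] at hk; omega)]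
    simp [pvSpecLoop]

-- ===== VERDICT (by name: the statement is the Claim_ definition above) =====
theorem build_index_dict_spec : Claim_equal_build_index_dict := by
  intro names _ hpre
  unfold Pre_build_index_dict at hpre
  unfold Spec_build_index_dict build_index_dict build_index_dict_alt
  have hA := pvA_loop names 0 (by omega) PySem.Dict.empty
  have hB := pvB_loop names 0 (by omega) PySem.Dict.empty
  have e0 : ((0 : Nat) : Int) = (0 : Int) := rfl
  rw [e0] at hA
  norm_num at hB
  have eA : pvChS 65 = "A" := by decide
  rw [eA] at hB
  rw [hA]
  congr 1
  rw [← hB]
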